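/-
  THE REAL GROUPS, AND THEIR LAWS: Q8's abstract record `Groups` (Vorbis/State.lean) instantiated with the owners' definitions,
  and `groups_laws : (groups len).Laws`, each law an instance of the owner's two-address lemma `transfer`.

      groups len : Groups            Arena := Vorbis.Arena × List Asan.Obj (the ghost arena and Q0's list of live non-stack objects)
                                     Bits := fun Blk => Bits Blk len · HeaderOK · CommentsOK · CB0 · CodebookOK · FloorsOK · FY1 ·
                                     ResidueOK · MappingOK · ModeOK · Mdct.BuffersOK · Mdct.MdctOK · T1 · ZF of the codebooks block
      groups_laws len                the ~28 facts: which clause is which H-clause; each group `Moves` (through `*f = p`) and `Carries`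
                                     (the coarse frame); the three dependent groups `GoodGiven`
      HD3.toMdct / HD3.hd3v          the bridges between the three forms of HD3: Q4's exponent form `HD3 mem f` (the clause), Q7's
                                     `Mdct.HD3 mem f` (`IsBlocksize`, what the MDCT closed forms take), Q8's `HD3v b0 b1` (ranges and
                                     divisibility, what the window arithmetic takes)
-/
import Vorbis.Invariant.Blk
import Vorbis.State.BitsLaws
import Vorbis.Codebook
import Vorbis.Floor
import Vorbis.ResidueMapping
import Vorbis.ResidueMappingArena
import Vorbis.Mdct
namespace Vorbis
open X86 X86.User Asan

/-! ### HD3, one clause in three forms -/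

/-- **From the clause HD3 (exponent form) to the form the MDCT lemmas take.** -/
theorem HD3.toMdct {mem : Mem} {f : Nat} (h : HD3 mem f) : Mdct.HD3 mem f := by
  obtain ⟨a, b, h6, hab, h13, e0, e1⟩ := h
  exact Mdct.HD3.of_pow e0 e1 h6 hab h13

/-- **From the clause HD3 to the form the window arithmetic takes.** -/
theorem HD3.hd3v {mem : Mem} {f : Nat} (h : HD3 mem f) :
    HD3v (stb_vorbis.blocksize_0 mem f) (stb_vorbis.blocksize_1 mem f) := by
  obtain ⟨a, b, h6, hab, h13, e0, e1⟩ := h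
  exact HD3v.of_pow _ _ a b e0 e1 h6 hab h13

/-- `bsize mem f 1` is `blocksize_1` (HD3: it is positive). -/
theorem HD3.b1_eq {mem : Mem} {f : Nat} (h : HD3 mem f) : stb_vorbis.blocksize_1 mem f = (bsize mem f 1 : Int) :=
  h.toMdct.blocksize_1_eq

/-! ### The record -/

/-- **The groups of clauses of the decoder invariant, for an input of `len` bytes.** -/
def groups (len : Nat) : Groups where
  Arena := Arena × List Obj
  ArenaOK := fun A mem f => ArenaOK A.1 A.2 mem f
  ADO := fun A mem f => ADO A.1 A.2 mem f
  ADOBusy := fun A n mem f => ADOBusy A.1 A.2 mem f n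
  NoTemps := fun A => A.1.temps = []
  Fresh := fun A => A.1.setups = [] ∧ A.1.temps = []
  HasSetup := fun A B => A.1.Blk B
  ZF := fun mem f i => ZF mem (stb_vorbis.codebooks mem f) (stb_vorbis.codebook_count mem f).toNat i
  Bits := fun Blk => Bits Blk len
  HeaderOK := HeaderGroup
  CommentOK := CommentsOK
  CB0 := CB0
  CodebookOK := CodebookOK
  FloorOK := FloorsOK
  FinalYOK := FY1
  ResidueOK := ResidueOK
  MappingOK := MappingOK
  ModeOK := fun _ mem f => ModeOK mem f
  BuffersOK := Mdct.BuffersOK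
  MdctOK := Mdct.MdctOK
  TempOK := fun _ mem f => T1 mem f

/-! ### The laws of the groups that are not proved in their owners' files -/

/-- `FloorsOK` follows the object and has the coarse frame. -/
theorem FloorsOK.good : Group.Good FloorsOK := by
  constructor
  · intro Blk Blk' mem mem' p f hm h
    exact h.transfer (hm.objEq (by decide)) (fun _ hR => hm.kept (h.reads_blk hR)) (fun B _ hb => hm.sub B hb)
  · intro Blk Blk' mem mem' f hall hsub hob h
    exact h.transfer (ObjEq.of_kept_obj (hall _ hob) (by decide)) (fun _ hR => hall _ (h.reads_blk hR))
      (fun B _ hb => hsub B hb)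

/-- The block FY1 reads is FL2's. -/
theorem FY1.reads_blk_of_floor {Blk : Block → Prop} {mem : Mem} {f : Nat} {B : Block} (hfl : FloorsOK Blk mem f)
    (hR : FY1.Reads mem f B) : Blk B := by
  cases hR with
  | config => exact hfl.FL2

/-- **FY1 follows the object and has the coarse frame, given HD1 and FL1 / FL2** (it reads `values` of every floor and the
16-entry pointer array). -/
theorem FY1.goodGiven : Group.GoodGiven (fun Blk mem f => HeaderGroup Blk mem f ∧ FloorsOK Blk mem f) FY1 := by
  constructor
  · intro Blk Blk' mem mem' p f hm hq h
    exact h.transfer hq.2.toFloorShape hq.1.HD1.2 (hm.objEq (by decide))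
      (fun _ hR => hm.kept (FY1.reads_blk_of_floor hq.2 hR)) (fun B _ hb => hm.sub B hb)
  · intro Blk Blk' mem mem' f hall hsub hob hq h
    exact h.transfer hq.2.toFloorShape hq.1.HD1.2 (ObjEq.of_kept_obj (hall _ hob) (by decide))
      (fun _ hR => hall _ (FY1.reads_blk_of_floor hq.2 hR)) (fun B _ hb => hsub B hb)

/-- The codebooks block, from CB0 in its non-NULL form. -/
theorem CB0.block {Blk : Block → Prop} {mem : Mem} {f : Nat} (h : CB0 Blk mem f) (hne : stb_vorbis.codebooks mem f ≠ 0) :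
    Blk (codebooksBlock mem f) :=
  (h.ok hne).F2

/-- **`ResidueOK` follows the object and has the coarse frame, given the codebooks block** (R7b, R8a, R8b read the class books). -/
theorem ResidueOK.goodGiven :
    Group.GoodGiven (fun Blk mem f => CB0 Blk mem f ∧ stb_vorbis.codebooks mem f ≠ 0) ResidueOK := by
  constructor
  · intro Blk Blk' mem mem' p f hm hq h
    exact h.transfer (hm.objEq (by decide)) (fun _ hR => hm.kept (h.reads_blk (hq.1.block hq.2) hR))
      (fun B _ hb => hm.sub B hb)
  · intro Blk Blk' mem mem' f hall hsub hob hq h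
    exact h.transfer (ObjEq.of_kept_obj (hall _ hob) (by decide)) (fun _ hR => hall _ (h.reads_blk (hq.1.block hq.2) hR))
      (fun B _ hb => hsub B hb)

/-- `MappingOK` follows the object and has the coarse frame. -/
theorem MappingOK.good : Group.Good MappingOK := by
  constructor
  · intro Blk Blk' mem mem' p f hm h
    exact h.transfer (hm.objEq (by decide)) (fun _ hR => hm.kept (h.reads_blk hR)) (fun B _ hb => hm.sub B hb)
  · intro Blk Blk' mem mem' f hall hsub hob h
    exact h.transfer (ObjEq.of_kept_obj (hall _ hob) (by decide)) (fun _ hR => hall _ (h.reads_blk hR))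
      (fun B _ hb => hsub B hb)

/-- `ModeOK` as a `Group` follows the object and has the coarse frame. -/
theorem ModeOK.good : Group.Good (fun _ mem f => ModeOK mem f) := by
  constructor
  · intro Blk Blk' mem mem' p f hm h
    exact h.transfer (hm.objEq (by decide))
  · intro Blk Blk' mem mem' f hall _ hob h
    exact h.transfer (ObjEq.of_kept_obj (hall _ hob) (by decide))

/-- **`BuffersOK` follows the object and has the coarse frame, given HD1** (the 16-entry pointer arrays). -/
theorem Mdct.BuffersOK.goodGiven : Group.GoodGiven HeaderGroup Mdct.BuffersOK := by
  constructor
  · intro Blk Blk' mem mem' p f hm hq h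
    exact Mdct.BuffersOK.moves hm hq.HD1.2 h
  · intro Blk Blk' mem mem' f hall hsub hob hq h
    exact Mdct.BuffersOK.carries hall hsub hob hq.HD1.2 h

/-- **T1 follows the object and has the coarse frame, given R1 / R2** (it reads `begin`, `end`, `part_size` of every record). -/
theorem T1.goodGiven : Group.GoodGiven ResidueOK (fun _ mem f => T1 mem f) := by
  constructor
  · intro Blk Blk' mem mem' p f hm hq h
    exact h.transfer (hm.objEq (by decide)) hq.R1.2 (fun _ hR => hm.kept (hq.owns_blk (T1.Reads.owned hR)))
  · intro Blk Blk' mem mem' f hall _ hob hq h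
    exact h.transfer (ObjEq.of_kept_obj (hall _ hob) (by decide)) hq.R1.2
      (fun _ hR => hall _ (hq.owns_blk (T1.Reads.owned hR)))

/-! ### Which clause is which H-clause -/

/-- CM2 is H1. -/
theorem CommentsOK.h1 {Blk : Block → Prop} {mem : Mem} {f : Nat} (h : CommentsOK Blk mem f) : H1 Blk mem f := by
  cases h.CM2 with
  | inl h0 => exact Or.inl h0
  | inr h1 => exact Or.inr h1.2

/-- CB0 is H4. -/
theorem CB0.h4 {Blk : Block → Prop} {mem : Mem} {f : Nat} (h : CB0 Blk mem f) : H4 Blk mem f := by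
  cases h with
  | inl h0 => exact Or.inl h0
  | inr h1 => exact Or.inr ⟨h1.F1.2, h1.F2⟩

/-- R1 + R2 give H2's second disjunct. -/
theorem ResidueOK.h2 {Blk : Block → Prop} {mem : Mem} {f : Nat} (h : ResidueOK Blk mem f) : H2 Blk mem f := by
  right
  have h2 := h.R2
  simp only [voff] at h2
  exact ⟨h.R1.2, h2⟩

/-- R7 + R8a + "codebooks ≠ NULL" give R9 = H3. -/
theorem ResidueOK.h3 {Blk : Block → Prop} {mem : Mem} {f : Nat} (h : ResidueOK Blk mem f)
    (hcb : stb_vorbis.codebooks mem f ≠ 0) : H3 Blk mem f := by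
  intro _ i hi _
  have hrec := h.record i hi
  exact ⟨hcb, hrec.R7, hrec.R8a⟩

/-- MP1 gives H5's second disjunct. -/
theorem MappingOK.h5 {Blk : Block → Prop} {mem : Mem} {f : Nat} (h : MappingOK Blk mem f) : H5 Blk mem f :=
  Or.inr ⟨h.MP1.2, h.MP1_block⟩

/-- AR1 + AR5: `alloc_buffer ≠ NULL`. -/
theorem ArenaOK.alloc_buffer_ne_zero {A : Arena} {others : List Obj} {mem : Mem} {f : Nat} (h : ArenaOK A others mem f) :
    stb_vorbis.alloc.alloc_buffer mem f ≠ 0 := by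
  have := h.buffer_ne_zero
  simp only [vacc, voff]
  exact this

/-! ### THE LAWS -/

/-- **`groups_laws`: the real groups satisfy everything Vorbis/State.lean asks of them.** Hence `VorbisOK.moves`, `VorbisOK.carries`,
`SD.deinitOK`, `P5.of_move`, `FB.carry` … hold for the real invariant (Vorbis/Invariant.lean states them as `Real.…`). -/
theorem groups_laws (len : Nat) : (groups len).Laws where
  bits_ob1 := fun h => Bits.ob1 h
  arena_buffer := fun h => ArenaOK.alloc_buffer_ne_zero h
  ado_arena := fun h => ⟨h.ok, h.idle⟩
  header_hd3v := fun h => HD3.hd3v (HeaderOK.HD3 h)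
  comment_h1 := fun h => CommentsOK.h1 h
  cb0_h4 := fun h => CB0.h4 h
  residue_h2 := fun h => ResidueOK.h2 h
  residue_h3 := fun h hcb => ResidueOK.h3 h hcb
  mapping_h5 := fun h => MappingOK.h5 h
  arena_moves := fun hc h => ArenaOK.moves hc h
  ado_moves := fun hc h => ADO.moves hc h
  bits := Bits.good len
  header := HeaderGroup.good
  comment := CommentsOK.good
  cb0 := CB0.good
  codebook := CodebookOK.stable
  floor := FloorsOK.good
  finalY := FY1.goodGiven
  residue := ResidueOK.goodGiven
  mapping := MappingOK.good
  mode := ModeOK.good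
  buffers := Mdct.BuffersOK.goodGiven
  mdct := Mdct.MdctOK.good
  temp := T1.goodGiven

end Vorbis
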